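-- pv_equiv track=rewrite | github.com/Ogekuri/useReq | tests/project_examples/useReq/doxygen_parser.py | format_doxygen_fields_as_markdown
-- ===== SOURCE A (Python) =====
-- from typing import Dict, List
--
-- DOXYGEN_TAGS = [
--     'brief',
--     'details',
--     'param',
--     'param[in]',
--     'param[out]',
--     'return',
--     'retval',
--     'exception',
--     'throws',
--     'warning',
--     'deprecated',
--     'note',
--     'see',
--     'sa',
--     'satisfies',
--     'pre',
--     'post',
-- ]
--
-- def format_doxygen_fields_as_markdown(doxygen_fields: Dict[str, List[str]]) -> List[str]:
--     """!
--     @brief Format extracted Doxygen fields as Markdown bulleted list.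
--     @details Emits fields in fixed order (DOXYGEN_TAGS), capitalizes tag, omits @ prefix, appends ':'. Skips tags not present in input. Each tag's content items are concatenated.
--     @param doxygen_fields Dictionary of tag -> content list from parse_doxygen_comment().
--     @return List of Markdown lines (each starting with '- ').
--     @note Output order matches DOXYGEN_TAGS sequence.
--     """
--     lines = []
--     for tag in DOXYGEN_TAGS:
--         if tag in doxygen_fields:
--             # Capitalize first letter, append colon
--             label = tag.capitalize() + ':'
--             # Join multiple content entries with space
--             content = ' '.join(doxygen_fields[tag])
--             lines.append(f'- {label} {content}')
--     return lines
-- ===== SOURCE B (Python) =====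
-- from typing import Dict, List
--
-- DOXYGEN_TAGS = [
--     'brief',
--     'details',
--     'param',
--     'param[in]',
--     'param[out]',
--     'return',
--     'retval',
--     'exception',
--     'throws',
--     'warning',
--     'deprecated',
--     'note',
--     'see',
--     'sa',
--     'satisfies',
--     'pre',
--     'post',
-- ]
--
-- def format_doxygen_fields_as_markdown(doxygen_fields: Dict[str, List[str]]) -> List[str]:
--     """Bucket the input's items by tag position, then concatenate the buckets."""
--     order = {tag: i for i, tag in enumerate(DOXYGEN_TAGS)}
--     buckets = [[] for _ in DOXYGEN_TAGS]
--     for tag, content in doxygen_fields.items():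
--         i = order.get(tag)
--         if i is not None:
--             buckets[i].append(f'- {tag.capitalize()}: {" ".join(content)}')
--     return [line for bucket in buckets for line in bucket]
-- ===== Notes on version B (the rewrite author's own statement) =====
-- stated objective: alternative
-- what changed: B is driven by the input dict: it distributes the items into per-tag buckets via a tag->position index (a counting/bucket pass) and concatenates the buckets, instead of A's scan of the fixed tag list with a membership test per tag.
import Mathlib
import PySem

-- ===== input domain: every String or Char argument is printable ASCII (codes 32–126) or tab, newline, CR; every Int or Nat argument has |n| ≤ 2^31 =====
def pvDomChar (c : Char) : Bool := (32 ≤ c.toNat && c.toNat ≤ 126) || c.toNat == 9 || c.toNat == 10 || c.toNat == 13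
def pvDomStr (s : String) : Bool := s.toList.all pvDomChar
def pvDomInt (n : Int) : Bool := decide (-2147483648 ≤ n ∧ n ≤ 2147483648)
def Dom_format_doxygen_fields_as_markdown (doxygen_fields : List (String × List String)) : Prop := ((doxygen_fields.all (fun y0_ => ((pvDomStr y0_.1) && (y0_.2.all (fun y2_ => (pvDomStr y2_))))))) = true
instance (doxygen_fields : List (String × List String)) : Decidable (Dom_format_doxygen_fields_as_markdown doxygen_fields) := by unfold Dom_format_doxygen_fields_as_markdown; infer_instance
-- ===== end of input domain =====

-- B buckets the dict's items by tag position (via a tag -> index table) and concatenates the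
-- buckets, instead of A's scan of the fixed tag list with a per-tag membership test
-- (objective: alternative algorithm; same asymptotic cost).

-- shared constant DOXYGEN_TAGS
def pvTags : List String :=
  ["brief", "details", "param", "param[in]", "param[out]", "return", "retval",
   "exception", "throws", "warning", "deprecated", "note", "see", "sa",
   "satisfies", "pre", "post"]

-- hand port of str.capitalize(): uppercase first char, lowercase the rest (exact on ASCII)
def pyCapitalize (s : String) : String :=
  match s.toList with
  | [] => ""
  | c :: cs => String.ofList (c.toUpper :: PySem.Chars.lower cs)

-- ===== PORT A =====
def format_doxygen_fields_as_markdown (doxygen_fields : List (String × List String)) : List String :=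
  pvTags.foldl (fun lines tag =>
    if (PySem.Dict.mk doxygen_fields).contains tag then
      -- label = tag.capitalize() + ':' ; content = ' '.join(doxygen_fields[tag]) ; f'- {label} {content}'
      lines ++ ["- " ++ (pyCapitalize tag ++ ":") ++ " " ++
                PySem.Str.join " " ((PySem.Dict.mk doxygen_fields).getD tag [])]
    else lines) []

-- ===== PORT B =====
def format_doxygen_fields_as_markdown_alt (doxygen_fields : List (String × List String)) : List String :=
  let order : PySem.Dict String Int :=
    (PySem.List.enumerate pvTags).foldl (fun o p => o.insert p.2 p.1) PySem.Dict.empty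
  let buckets : List (List String) :=
    doxygen_fields.foldl (fun bs kv =>
      match order.get? kv.1 with
      | some i => bs.set i.toNat
          (bs.getD i.toNat [] ++ ["- " ++ pyCapitalize kv.1 ++ ": " ++ PySem.Str.join " " kv.2])
      | none => bs)
      (pvTags.map (fun _ => []))
  buckets.flatten

-- ===== PRECONDITION & SPEC =====
-- Pre_ restricts to lists with pairwise-distinct keys: the argument is a Python dict, whose
-- association-list representation always has distinct keys, so no input A accepts is excluded.
def Pre_format_doxygen_fields_as_markdown (doxygen_fields : List (String × List String)) : Prop :=
  (doxygen_fields.map Prod.fst).Nodup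
instance (doxygen_fields : List (String × List String)) : Decidable (Pre_format_doxygen_fields_as_markdown doxygen_fields) := by unfold Pre_format_doxygen_fields_as_markdown; infer_instance

def pvWitness_format_doxygen_fields_as_markdown : (List (String × List String)) :=
  [("return", ["an int"]), ("brief", ["adds", "one"]), ("zzz", ["ignored"])]

def Spec_format_doxygen_fields_as_markdown (doxygen_fields : List (String × List String)) (out : List String) : Prop := out = format_doxygen_fields_as_markdown_alt doxygen_fields
instance (doxygen_fields : List (String × List String)) (out : List String) : Decidable (Spec_format_doxygen_fields_as_markdown doxygen_fields out) := by unfold Spec_format_doxygen_fields_as_markdown; infer_instance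

-- ===== CLAIM (what is proved, stated in full; the proofs are below) =====
def Claim_equal_format_doxygen_fields_as_markdown : Prop := ∀ (doxygen_fields : List (String × List String)), Dom_format_doxygen_fields_as_markdown doxygen_fields → Pre_format_doxygen_fields_as_markdown doxygen_fields → Spec_format_doxygen_fields_as_markdown doxygen_fields (format_doxygen_fields_as_markdown doxygen_fields)

-- ===== LEMMAS AND PROOFS =====


def pvLine (t : String) (cs : List String) : String :=
  "- " ++ pyCapitalize t ++ ": " ++ PySem.Str.join " " cs

lemma pv_str_line (a b : String) : "- " ++ (a ++ ":") ++ " " ++ b = "- " ++ a ++ ": " ++ b := by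
  apply String.ext; simp

def pvGA (d : List (String × List String)) (t : String) : List String :=
  match (PySem.Dict.mk d).get? t with
  | some cs => [pvLine t cs]
  | none => []

lemma pv_A_foldl (d : List (String × List String)) (ts : List String) (init : List String) :
    ts.foldl (fun lines tag =>
      if (PySem.Dict.mk d).contains tag then
        lines ++ ["- " ++ (pyCapitalize tag ++ ":") ++ " " ++
                  PySem.Str.join " " ((PySem.Dict.mk d).getD tag [])]
      else lines) init = init ++ ts.flatMap (pvGA d) := by
  induction ts generalizing init with
  | nil => simp
  | cons t ts ih =>
    simp only [List.foldl_cons, List.flatMap_cons, ih]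
    rw [PySem.Dict.contains_eq_isSome_get?]
    cases h : (PySem.Dict.mk d).get? t with
    | none => simp [pvGA, h]
    | some cs =>
      simp only [Option.isSome_some, if_pos, pvGA, h]
      rw [PySem.Dict.getD_of_get?_eq_some _ [] h, pv_str_line]
      simp [pvLine]

lemma pv_A_eq (d : List (String × List String)) :
    format_doxygen_fields_as_markdown d = pvTags.flatMap (pvGA d) := by
  rw [format_doxygen_fields_as_markdown, pv_A_foldl]; simp

-- order dict
lemma pv_ordfold (k : String) :
    ∀ (ts : List String), ts.Nodup → ∀ (s : Int) (d0 : PySem.Dict String Int),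
    ((PySem.List.enumerate ts s).foldl (fun o p => o.insert p.2 p.1) d0).get? k
      = if k ∈ ts then some (s + (ts.idxOf k : Int)) else d0.get? k := by
  intro ts
  induction ts with
  | nil => simp [PySem.List.enumerate_nil]
  | cons t ts ih =>
    intro hn s d0
    rw [PySem.List.enumerate_cons]
    simp only [List.foldl_cons]
    rw [ih hn.of_cons (s+1) (d0.insert t s)]
    by_cases hm : k ∈ ts
    · have hkt : k ≠ t := fun h => (List.nodup_cons.mp hn).1 (h ▸ hm)
      simp [hm, hkt, hkt.symm]
      ring
    · by_cases hkt : k = t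
      · subst hkt
        simp [hm, PySem.Dict.get?_insert_self]
      · have h1 : (d0.insert t s).get? k = d0.get? k :=
          PySem.Dict.get?_insert_of_ne d0 s hkt
        simp [hm, hkt, h1]

def pvOrder : PySem.Dict String Int :=
  (PySem.List.enumerate pvTags).foldl (fun o p => o.insert p.2 p.1) PySem.Dict.empty

lemma pv_order_get? (k : String) :
    pvOrder.get? k = if k ∈ pvTags then some ((pvTags.idxOf k : Nat) : Int) else none := by
  rw [pvOrder, pv_ordfold k pvTags (by decide) 0 PySem.Dict.empty]
  simp [PySem.Dict.get?_empty]

-- buckets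
def pvLinesOf (pre : List (String × List String)) (t : String) : List String :=
  (pre.filter (fun kv => kv.1 == t)).map (fun kv => pvLine kv.1 kv.2)

lemma pv_linesOf_append_mem (pre : List (String × List String)) (kv : String × List String) :
    pvLinesOf (pre ++ [kv]) kv.1 = pvLinesOf pre kv.1 ++ [pvLine kv.1 kv.2] := by
  simp [pvLinesOf, List.filter_append]

lemma pv_linesOf_append_ne (pre : List (String × List String)) (kv : String × List String)
    (t : String) (h : kv.1 ≠ t) :
    pvLinesOf (pre ++ [kv]) t = pvLinesOf pre t := by
  simp [pvLinesOf, List.filter_append, h]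

lemma pv_map_eq_set_map {α β : Type} {ts : List α} (hn : ts.Nodup) {j : Nat} (hj : j < ts.length)
    (f g : α → β) (hg : ∀ t, t ≠ ts[j] → g t = f t) :
    ts.map g = (ts.map f).set j (g ts[j]) := by
  apply List.ext_getElem
  · simp
  · intro i h1 h2
    rw [List.getElem_set]
    split
    · next hij => subst hij; simp
    · next hij =>
        simp only [List.getElem_map]
        rw [hg]
        intro h
        exact hij ((List.Nodup.getElem_inj_iff hn).mp h).symm

lemma pv_step_eq (pre : List (String × List String)) (kv : String × List String) :
    (match pvOrder.get? kv.1 with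
     | some i => (pvTags.map (pvLinesOf pre)).set i.toNat
         ((pvTags.map (pvLinesOf pre)).getD i.toNat [] ++
          ["- " ++ pyCapitalize kv.1 ++ ": " ++ PySem.Str.join " " kv.2])
     | none => pvTags.map (pvLinesOf pre))
    = pvTags.map (pvLinesOf (pre ++ [kv])) := by
  rw [pv_order_get?]
  by_cases hm : kv.1 ∈ pvTags
  · simp only [hm, if_pos, Int.toNat_natCast]
    have hj : pvTags.idxOf kv.1 < pvTags.length := List.idxOf_lt_length_of_mem hm
    have hgd : (pvTags.map (pvLinesOf pre)).getD (pvTags.idxOf kv.1) [] =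
        pvLinesOf pre (pvTags[pvTags.idxOf kv.1]) := by
      rw [List.getD_eq_getElem?_getD, List.getElem?_map]
      simp [List.getElem?_eq_getElem hj]
    rw [hgd]
    have hidx : pvTags[pvTags.idxOf kv.1] = kv.1 := List.getElem_idxOf hj
    rw [pv_map_eq_set_map (by decide) hj (pvLinesOf pre) (pvLinesOf (pre ++ [kv]))
        (fun t ht => pv_linesOf_append_ne pre kv t (by rw [hidx] at ht; exact fun h => ht h.symm))]
    rw [hidx, pv_linesOf_append_mem]
    rfl
  · simp only [hm, if_neg, not_false_iff]
    symm
    apply List.map_congr_left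
    intro t ht
    exact pv_linesOf_append_ne pre kv t (fun h => hm (h ▸ ht))

lemma pv_buckets (d : List (String × List String)) :
    ∀ pre, d.foldl (fun bs kv =>
      match pvOrder.get? kv.1 with
      | some i => bs.set i.toNat
          (bs.getD i.toNat [] ++ ["- " ++ pyCapitalize kv.1 ++ ": " ++ PySem.Str.join " " kv.2])
      | none => bs)
      (pvTags.map (pvLinesOf pre)) = pvTags.map (pvLinesOf (pre ++ d)) := by
  induction d with
  | nil => intro pre; simp
  | cons kv d ih =>
    intro pre
    simp only [List.foldl_cons]
    rw [pv_step_eq pre kv, ih (pre ++ [kv])]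
    simp

lemma pv_B_eq (d : List (String × List String)) :
    format_doxygen_fields_as_markdown_alt d = (pvTags.map (pvLinesOf d)).flatten := by
  rw [format_doxygen_fields_as_markdown_alt]
  have h0 : pvTags.map (fun _ => ([] : List String)) = pvTags.map (pvLinesOf []) :=
    List.map_congr_left (fun t _ => by simp [pvLinesOf])
  simp only [h0]
  rw [show ((PySem.List.enumerate pvTags).foldl (fun o p => o.insert p.2 p.1) PySem.Dict.empty) = pvOrder from rfl]
  rw [pv_buckets d []]
  simp

lemma pv_filter_key_nil (d : List (String × List String)) (t : String)
    (h : t ∉ d.map Prod.fst) : d.filter (fun kv => kv.1 == t) = [] := by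
  rw [List.filter_eq_nil_iff]
  intro kv hkv
  simp only [beq_iff_eq]
  intro he
  exact h (he ▸ List.mem_map_of_mem hkv)

lemma pv_linesOf_eq_gA (d : List (String × List String))
    (hn : (d.map Prod.fst).Nodup) (t : String) :
    pvLinesOf d t = pvGA d t := by
  induction d with
  | nil => simp [pvLinesOf, pvGA, PySem.Dict.get?]
  | cons kv d ih =>
    have hn' : (d.map Prod.fst).Nodup := by simpa using hn.of_cons
    rw [pvGA, PySem.Dict.get?_mk_cons]
    by_cases hkt : kv.1 = t
    · simp only [hkt, beq_self_eq_true, if_pos]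
      rw [pvLinesOf]
      rw [List.filter_cons_of_pos (by simp [hkt])]
      have : d.filter (fun p => p.1 == t) = [] := by
        apply pv_filter_key_nil
        intro hmem
        have : kv.1 ∈ d.map Prod.fst := hkt ▸ hmem
        exact (List.nodup_cons.mp (by simpa using hn)).1 this
      simp [this, hkt]
    · rw [if_neg (by simpa using hkt)]
      rw [pvLinesOf, List.filter_cons_of_neg (by simp [hkt])]
      rw [← pvGA, ← ih hn']
      rfl

theorem pv_main (d : List (String × List String)) (hn : (d.map Prod.fst).Nodup) :
    format_doxygen_fields_as_markdown d = format_doxygen_fields_as_markdown_alt d := by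
  rw [pv_A_eq, pv_B_eq]
  rw [List.map_congr_left (fun t _ => pv_linesOf_eq_gA d hn t)]
  simp [List.flatMap_def]

-- ===== VERDICT (by name: the statement is the Claim_ definition above) =====
theorem format_doxygen_fields_as_markdown_spec : Claim_equal_format_doxygen_fields_as_markdown := by
  intro d _ hn
  exact pv_main d hn
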